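-- pv_equiv track=rewrite | github.com/nlnuli/STP-MSTP-Protocol- | code/STP/MSTP/mstp.py | judge_from_the_same_switch
-- ===== SOURCE A (Python) =====
-- def judge_from_the_same_switch(list1):
--     # 1 表示不重复 0表示重复
--     list2 = list1[:]
--     n = len(list1)
--     for i in range(n):
--         list2[i] = list2[i][0:4]
--     list2 = list(set(list2))
--     n1 = len(list2)
--     if n1 == n:
--         return 1
--     else:
--         return 0
-- ===== SOURCE B (Python) =====
-- def judge_from_the_same_switch(list1):
--     # 1 = no duplicate 4-char prefixes, 0 = duplicates; sort-then-adjacent-scan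
--     prefixes = sorted(x[0:4] for x in list1)
--     for a, b in zip(prefixes, prefixes[1:]):
--         if a == b:
--             return 0
--     return 1
-- ===== Notes on version B (the rewrite author's own statement) =====
-- stated objective: alternative
-- what changed: Replaces A's copy-then-mutate loop plus set()-based dedup-and-count with building the prefix list directly, sorting it, and a single adjacent-pair scan that detects any duplicate.
import Mathlib
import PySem

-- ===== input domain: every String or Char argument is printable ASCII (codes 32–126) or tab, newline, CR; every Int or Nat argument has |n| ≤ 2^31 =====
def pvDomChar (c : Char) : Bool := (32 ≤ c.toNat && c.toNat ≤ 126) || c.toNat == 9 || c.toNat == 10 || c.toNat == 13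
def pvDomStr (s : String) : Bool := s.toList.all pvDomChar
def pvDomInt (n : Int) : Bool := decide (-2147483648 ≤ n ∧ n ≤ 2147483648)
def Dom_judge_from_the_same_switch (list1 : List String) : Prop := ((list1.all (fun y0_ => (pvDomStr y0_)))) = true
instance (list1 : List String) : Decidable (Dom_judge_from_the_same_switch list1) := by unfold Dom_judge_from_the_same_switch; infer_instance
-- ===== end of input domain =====

-- B replaces A's copy-then-mutate loop + set()-based dedup count by building the
-- prefix list, sorting it, and one adjacent-pair scan (alternative algorithm, same result).

-- ===== PORT A =====
-- list(set(list2)): only its LENGTH is consumed, so PySem.Set.ofList (set-equal, order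
-- unmodelled) is exact here. pyGetD with default "" is exact: i is always in range.
def judge_from_the_same_switch (list1 : List String) : Int :=
  let list2 := PySem.List.slice list1 none none
  let n := PySem.List.len list1
  let list2 := (PySem.List.pyRange 0 n 1).foldl
    (fun acc i => PySem.List.pySetD acc i (PySem.Str.slice (PySem.List.pyGetD acc i "") (some 0) (some 4))) list2
  let list2 := PySem.Set.ofList list2
  let n1 := PySem.List.len list2
  if n1 == n then 1 else 0

-- ===== PORT B =====
-- the 'for a, b in zip(prefixes, prefixes[1:])' scan, as structural recursion
def pvAdjScan : List String → Int
  | [] => 1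
  | [_] => 1
  | x :: y :: rest => if x == y then 0 else pvAdjScan (y :: rest)

def judge_from_the_same_switch_alt (list1 : List String) : Int :=
  pvAdjScan (PySem.List.sorted (list1.map (fun x => PySem.Str.slice x (some 0) (some 4))) (fun s => s) false)

-- ===== PRECONDITION & SPEC =====
def Spec_judge_from_the_same_switch (list1 : List String) (out : Int) : Prop := out = judge_from_the_same_switch_alt list1
instance (list1 : List String) (out : Int) : Decidable (Spec_judge_from_the_same_switch list1 out) := by unfold Spec_judge_from_the_same_switch; infer_instance

-- ===== CLAIM (what is proved, stated in full; the proofs are below) =====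
def Claim_equal_judge_from_the_same_switch : Prop := ∀ (list1 : List String), Dom_judge_from_the_same_switch list1 → Spec_judge_from_the_same_switch list1 (judge_from_the_same_switch list1)

-- ===== LEMMAS AND PROOFS =====

-- A's in-place loop 'list2[i] = list2[i][0:4]' maps f over the list
theorem pv_setloop (f : String → String) :
    ∀ (ys pre : List String),
      (PySem.List.pyRange (pre.length : Int) ((pre.length : Int) + (ys.length : Int)) 1).foldl
        (fun acc i => PySem.List.pySetD acc i (f (PySem.List.pyGetD acc i ""))) (pre ++ ys)
      = pre ++ ys.map f := by
  intro ys
  induction ys with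
  | nil => intro pre; simp [PySem.List.pyRange_one_eq_nil]
  | cons y t ih =>
    intro pre
    rw [PySem.List.pyRange_one_cons (by simp only [List.length_cons]; push_cast; omega)]
    simp only [List.foldl_cons]
    have hget : PySem.List.pyGetD (pre ++ y :: t) (pre.length : Int) "" = y := by
      rw [PySem.List.pyGetD_natCast]
      simp [List.getD]
    have hset : PySem.List.pySetD (pre ++ y :: t) (pre.length : Int) (f y)
        = (pre ++ [f y]) ++ t := by
      rw [PySem.List.pySetD_natCast]
      rw [List.set_append_right _ _ (le_refl _)]
      simp
    rw [hget, hset]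
    have h1 : ((pre.length : Int) + 1) = (((pre ++ [f y]).length : Int)) := by
      simp
    have h2 : ((pre.length : Int) + ((y :: t).length : Int))
        = (((pre ++ [f y]).length : Int) + (t.length : Int)) := by
      simp only [List.length_cons, List.length_append, List.length_nil]
      push_cast; omega
    rw [h1, h2, ih (pre ++ [f y])]
    simp

-- set(l) has as many elements as l iff l has no duplicates
theorem pv_ofList_length_iff (l : List String) :
    ((PySem.Set.ofList l).length = l.length) ↔ l.Nodup := by
  induction l using List.reverseRecOn with
  | nil => simp [PySem.Set.ofList, PySem.Set.empty]
  | append_singleton t x ih =>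
    have hfold : PySem.Set.ofList (t ++ [x]) = PySem.Set.add (PySem.Set.ofList t) x := by
      simp [PySem.Set.ofList, List.foldl_append]
    have hiff : (t ++ [x]).Nodup ↔ t.Nodup ∧ x ∉ t := by
      constructor
      · intro h
        exact ⟨(List.sublist_append_left t [x]).nodup h,
               fun hm => List.disjoint_of_nodup_append h hm (by simp)⟩
      · rintro ⟨h1, h2⟩
        rw [List.nodup_append]
        exact ⟨h1, by simp, by intro a ha b hb heq; rw [List.mem_singleton] at hb; exact h2 (hb ▸ heq ▸ ha)⟩
    by_cases hx : x ∈ t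
    · have hadd : PySem.Set.ofList (t ++ [x]) = PySem.Set.ofList t := by
        rw [hfold]; simp [PySem.Set.add, PySem.Set.mem_ofList, hx]
      have hlen := PySem.Set.length_ofList_le t
      constructor
      · intro h; rw [hadd] at h; simp at h; omega
      · intro h; exact absurd hx (hiff.mp h).2
    · have hadd : PySem.Set.ofList (t ++ [x]) = PySem.Set.ofList t ++ [x] := by
        rw [hfold]; simp [PySem.Set.add, PySem.Set.mem_ofList, hx]
      rw [hadd, hiff]
      simp only [List.length_append, List.length_cons, List.length_nil]
      constructor
      · intro h; exact ⟨ih.mp (by omega), hx⟩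
      · rintro ⟨h1, _⟩; have := ih.mpr h1; omega

-- on a ≤-sorted list, the adjacent scan decides Nodup
theorem pv_adjScan_eq (l : List String) (h : l.Pairwise (· ≤ ·)) :
    pvAdjScan l = if l.Nodup then 1 else 0 := by
  induction l with
  | nil => simp [pvAdjScan]
  | cons x t ih =>
    cases t with
    | nil => simp [pvAdjScan]
    | cons y r =>
      by_cases hxy : x = y
      · subst hxy
        simp [pvAdjScan]
      · have hpw := h
        rw [List.pairwise_cons] at hpw
        have htail := ih hpw.2
        have hxle : x ≤ y := hpw.1 y (by simp)
        have hnotmem : x ∉ y :: r := by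
          intro hm
          rcases List.mem_cons.mp hm with h1 | h2
          · exact hxy h1
          · have hy := hpw.2
            rw [List.pairwise_cons] at hy
            have : y ≤ x := hy.1 x h2
            exact hxy (le_antisymm hxle this)
        simp only [pvAdjScan, beq_iff_eq, if_neg hxy]
        rw [htail]
        simp [List.nodup_cons, hnotmem]

-- ===== VERDICT (by name: the statement is the Claim_ definition above) =====
theorem judge_from_the_same_switch_spec : Claim_equal_judge_from_the_same_switch := by
  intro list1 _
  unfold Spec_judge_from_the_same_switch judge_from_the_same_switch judge_from_the_same_switch_alt
  have hloop := pv_setloop (fun s => PySem.Str.slice s (some 0) (some 4)) list1 []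
  simp only [List.nil_append, List.length_nil, Nat.cast_zero, zero_add] at hloop
  simp only [PySem.List.slice_none_none, PySem.List.len_eq]
  rw [hloop]
  have hcond : ((PySem.Set.ofList (list1.map (fun s => PySem.Str.slice s (some 0) (some 4)))).length = list1.length)
      ↔ (list1.map (fun s => PySem.Str.slice s (some 0) (some 4))).Nodup := by
    rw [← List.length_map (f := fun s => PySem.Str.slice s (some 0) (some 4)) (as := list1)]
    exact pv_ofList_length_iff _
  have hpw : (PySem.List.sorted (list1.map (fun s => PySem.Str.slice s (some 0) (some 4))) (fun s => s) false).Pairwise (· ≤ ·) := by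
    simpa using PySem.List.sorted_pairwise (list1.map (fun s => PySem.Str.slice s (some 0) (some 4))) (fun s => s)
  rw [pv_adjScan_eq _ hpw]
  simp only [beq_iff_eq, Nat.cast_inj, hcond,
    (PySem.List.sorted_perm (list1.map (fun s => PySem.Str.slice s (some 0) (some 4))) (fun s => s) false).nodup_iff]
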